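-- pv_equiv track=rewrite | github.com/Ashura5/MECEE | model_integration.py | correct_sentence
-- ===== SOURCE A (Python) =====
-- def correct_sentence(error_sentence, correct_sentences):
--     new_sentence = list(error_sentence)  # 将错误句子转为字符列表方便后续操作
--
--     for i in range(len(new_sentence)):  # 对于错误句子中的每个字符
--         for sentence in correct_sentences:  # 遍历每个修正后的句子
--             if len(sentence) > i and sentence[i] != new_sentence[i]:  # 如果该字符有修改
--                 new_sentence[i] = sentence[i]  # 使用修改后的字符
--                 break  # 跳出内层循环，只保留第一个修改
--
--     return ''.join(new_sentence)  # 将字符列表重新拼接为字符串并返回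
-- ===== SOURCE B (Python) =====
-- def correct_sentence(error_sentence, correct_sentences):
--     # Stage 1: iterate the variants in REVERSED order and record every differing
--     # char in a patch dict with plain last-write-wins overwrite; because the first
--     # variant is processed last, the dict ends up holding, for each position, the
--     # char of the FIRST variant that differs from the original there.
--     patches = {}
--     for sentence in reversed(correct_sentences):
--         for i, (orig_ch, new_ch) in enumerate(zip(error_sentence, sentence)):
--             if new_ch != orig_ch:
--                 patches[i] = new_ch
--     # Stage 2: one pass applying the patches.
--     return ''.join(patches.get(i, ch) for i, ch in enumerate(error_sentence))
-- ===== Notes on version B (the rewrite author's own statement) =====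
-- stated objective: alternative
-- what changed: Replaces A's position-major scan with per-position early break by a two-stage algorithm: first build a patch dictionary by iterating the variants in REVERSED order with unconditional last-write-wins overwrites (so the first differing variant per position survives), then produce the output in one pass applying the dictionary to the original string.
import Mathlib
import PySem

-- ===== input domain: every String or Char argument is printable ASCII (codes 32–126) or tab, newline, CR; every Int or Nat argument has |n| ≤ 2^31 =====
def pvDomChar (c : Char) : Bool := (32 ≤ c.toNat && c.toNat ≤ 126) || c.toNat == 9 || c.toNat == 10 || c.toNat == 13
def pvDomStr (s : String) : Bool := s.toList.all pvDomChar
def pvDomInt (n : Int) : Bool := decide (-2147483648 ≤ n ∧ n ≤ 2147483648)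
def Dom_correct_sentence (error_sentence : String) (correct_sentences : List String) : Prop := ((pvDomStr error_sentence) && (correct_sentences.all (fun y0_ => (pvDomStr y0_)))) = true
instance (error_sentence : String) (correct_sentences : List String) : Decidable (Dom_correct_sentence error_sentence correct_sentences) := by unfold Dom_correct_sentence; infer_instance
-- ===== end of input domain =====

-- B replaces A's position-major scan with an early break by a two-stage pass: a patch dict built by
-- iterating the variants in reversed order with last-write-wins overwrite, then one join applying it (alternative).


-- ===== PORT A =====
-- inner 'for sentence in correct_sentences: … break' loop of A
def csInner (i : Nat) (ns : List Char) : List String → List Char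
  | [] => ns
  | s :: rest =>
    if s.toList.length > i ∧ s.toList.getD i ' ' ≠ ns.getD i ' ' then
      ns.set i (s.toList.getD i ' ')
    else csInner i ns rest

def correct_sentence (error_sentence : String) (correct_sentences : List String) : String :=
  String.mk ((List.range error_sentence.toList.length).foldl
    (fun ns i => csInner i ns correct_sentences) error_sentence.toList)

-- ===== PORT B =====
-- inner 'for i, (orig_ch, new_ch) in enumerate(zip(error_sentence, sentence)): …' loop of B
def csDiffs (orig s : List Char) (d : PySem.Dict Int Char) : PySem.Dict Int Char :=
  (PySem.List.enumerate (orig.zip s)).foldl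
    (fun d p => if p.2.2 ≠ p.2.1 then d.insert p.1 p.2.2 else d) d

def correct_sentence_alt (error_sentence : String) (correct_sentences : List String) : String :=
  let patches := correct_sentences.reverse.foldl
    (fun d s => csDiffs error_sentence.toList s.toList d) PySem.Dict.empty
  String.mk ((PySem.List.enumerate error_sentence.toList).map
    (fun p => patches.getD p.1 p.2))

-- ===== PRECONDITION & SPEC =====
def Spec_correct_sentence (error_sentence : String) (correct_sentences : List String) (out : String) : Prop := out = correct_sentence_alt error_sentence correct_sentences
instance (error_sentence : String) (correct_sentences : List String) (out : String) : Decidable (Spec_correct_sentence error_sentence correct_sentences out) := by unfold Spec_correct_sentence; infer_instance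

-- ===== CLAIM (what is proved, stated in full; the proofs are below) =====
def Claim_equal_correct_sentence : Prop := ∀ (error_sentence : String) (correct_sentences : List String), Dom_correct_sentence error_sentence correct_sentences → Spec_correct_sentence error_sentence correct_sentences (correct_sentence error_sentence correct_sentences)

-- ===== LEMMAS AND PROOFS =====

lemma csGetD_set_self (l : List Char) (n : Nat) (c : Char) (h : n < l.length) :
    (l.set n c).getD n ' ' = c := by
  rw [List.getD_eq_getElem?_getD, List.getElem?_set_self (by simpa using h)]; rfl

lemma csGetD_set_ne (l : List Char) (n m : Nat) (c : Char) (h : m ≠ n) :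
    (l.set n c).getD m ' ' = l.getD m ' ' := by
  rw [List.getD_eq_getElem?_getD, List.getElem?_set_ne (by omega), List.getD_eq_getElem?_getD]

-- the first sentence that fixes position j (shared characterisation of both ports)
def csPred (orig : List Char) (j : Nat) (s : String) : Bool :=
  decide (s.toList.length > j ∧ s.toList.getD j ' ' ≠ orig.getD j ' ')

def csFix (orig : List Char) (cs : List String) (j : Nat) : Char :=
  match cs.find? (csPred orig j) with
  | some s => s.toList.getD j ' '
  | none => orig.getD j ' '

lemma csInner_eq (orig : List Char) (i : Nat) (ns : List Char) (cs : List String)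
    (h : ns.getD i ' ' = orig.getD i ' ') :
    csInner i ns cs = match cs.find? (csPred orig i) with
      | some s => ns.set i (s.toList.getD i ' ')
      | none => ns := by
  induction cs with
  | nil => rfl
  | cons s rest ih =>
    simp only [csInner]
    rw [h]
    by_cases hq : s.toList.length > i ∧ s.toList.getD i ' ' ≠ orig.getD i ' '
    · rw [if_pos hq, List.find?_cons_of_pos (by simpa [csPred] using hq)]
    · rw [if_neg hq, List.find?_cons_of_neg (by simpa [csPred] using hq), ih]

lemma csA_inv (orig : List Char) (cs : List String) :
    ∀ n, n ≤ orig.length →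
      ((List.range n).foldl (fun ns i => csInner i ns cs) orig).length = orig.length ∧
      ∀ j, ((List.range n).foldl (fun ns i => csInner i ns cs) orig).getD j ' '
            = if j < n then csFix orig cs j else orig.getD j ' ' := by
  intro n
  induction n with
  | zero => exact fun _ => ⟨rfl, fun j => by simp⟩
  | succ n ih =>
    intro hn
    obtain ⟨hlen, hget⟩ := ih (Nat.le_of_succ_le hn)
    rw [List.range_succ, List.foldl_append, List.foldl_cons, List.foldl_nil]
    have hni : ((List.range n).foldl (fun ns i => csInner i ns cs) orig).getD n ' '
        = orig.getD n ' ' := by rw [hget n, if_neg (lt_irrefl n)]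
    rw [csInner_eq orig n _ cs hni]
    rcases hfind : cs.find? (csPred orig n) with _ | s
    · refine ⟨hlen, fun j => ?_⟩
      rw [hget j]
      by_cases hj : j = n
      · subst hj
        rw [if_neg (lt_irrefl j), if_pos (Nat.lt_succ_self j)]
        simp [csFix, hfind]
      · by_cases hj' : j < n
        · rw [if_pos hj', if_pos (by omega)]
        · rw [if_neg hj', if_neg (by omega)]
    · refine ⟨by rw [List.length_set]; exact hlen, fun j => ?_⟩
      by_cases hj : j = n
      · subst hj
        rw [csGetD_set_self _ _ _ (by rw [hlen]; omega), if_pos (Nat.lt_succ_self j)]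
        simp [csFix, hfind]
      · rw [csGetD_set_ne _ _ _ _ hj, hget j]
        by_cases hj' : j < n
        · rw [if_pos hj', if_pos (by omega)]
        · rw [if_neg hj', if_neg (by omega)]

-- proof-side characterisation of one csDiffs fold: the unique entry it may write for a key
def csLook (l : List (Char × Char)) (s0 k : Int) : Option Char :=
  match l with
  | [] => none
  | p :: rest => if k = s0 ∧ p.2 ≠ p.1 then some p.2 else csLook rest (s0 + 1) k

lemma csLook_lt (l : List (Char × Char)) (s0 k : Int) (h : k < s0) :
    csLook l s0 k = none := by
  induction l generalizing s0 with
  | nil => rfl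
  | cons p rest ih =>
    simp only [csLook]
    rw [if_neg (fun hc => absurd hc.1 (by omega)), ih _ (by omega)]

lemma csDiffs_get? (l : List (Char × Char)) (s0 : Int) (d : PySem.Dict Int Char) (k : Int) :
    ((PySem.List.enumerate l s0).foldl
      (fun d p => if p.2.2 ≠ p.2.1 then d.insert p.1 p.2.2 else d) d).get? k
      = match csLook l s0 k with
        | some c => some c
        | none => d.get? k := by
  induction l generalizing s0 d with
  | nil => rfl
  | cons p rest ih =>
    rw [PySem.List.enumerate_cons, List.foldl_cons]
    simp only [csLook]
    by_cases hd : p.2 ≠ p.1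
    · rw [if_pos hd]
      by_cases hk : k = s0
      · subst hk
        rw [if_pos ⟨rfl, hd⟩, ih (k + 1) _, csLook_lt rest (k + 1) k (by omega),
          PySem.Dict.get?_insert_self]
      · rw [if_neg (fun hc => hk hc.1), ih (s0 + 1) _]
        rcases csLook rest (s0 + 1) k with _ | c
        · exact PySem.Dict.get?_insert_of_ne _ _ hk
        · rfl
    · rw [if_neg hd, if_neg (fun hc => hd hc.2), ih (s0 + 1) _]

lemma csLook_at (l : List (Char × Char)) (s0 : Int) (j : Nat) :
    csLook l s0 (s0 + j)
      = if h : j < l.length then (if l[j].2 ≠ l[j].1 then some l[j].2 else none)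
        else none := by
  induction l generalizing s0 j with
  | nil => simp [csLook]
  | cons p rest ih =>
    cases j with
    | zero =>
      by_cases hd : p.2 = p.1
      · simp [csLook, hd, csLook_lt rest (s0 + 1) s0 (by omega)]
      · simp [csLook, hd]
    | succ m =>
      simp only [csLook]
      rw [if_neg (fun hc => by have h1 := hc.1; omega),
        show s0 + ((m + 1 : Nat) : Int) = (s0 + 1) + (m : Nat) by push_cast; ring, ih]
      simp

lemma csDiffs_getD (orig s : List Char) (d : PySem.Dict Int Char) (j : Nat)
    (hj : j < orig.length) (dflt : Char) :
    (csDiffs orig s d).getD (j : Int) dflt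
      = if j < s.length ∧ s.getD j ' ' ≠ orig.getD j ' ' then s.getD j ' '
        else d.getD (j : Int) dflt := by
  have hkey : ((j : Int)) = (0 : Int) + j := (zero_add _).symm
  unfold csDiffs
  rw [PySem.Dict.getD_eq_get?_getD, hkey, csDiffs_get? (orig.zip s) 0 d, csLook_at]
  by_cases hs : j < s.length
  · have hjz : j < (orig.zip s).length := by rw [List.length_zip]; omega
    rw [dif_pos hjz, List.getElem_zip]
    have hgs : s.getD j ' ' = s[j] := List.getD_eq_getElem s ' ' hs
    have hgo : orig.getD j ' ' = orig[j] := List.getD_eq_getElem orig ' ' hj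
    by_cases hd : s[j] = orig[j]
    · rw [if_neg (show ¬ ((orig[j], s[j]).2 ≠ (orig[j], s[j]).1) from by simpa using hd),
        if_neg (fun hc => by rw [hgs, hgo] at hc; exact hc.2 hd),
        PySem.Dict.getD_eq_get?_getD]
    · rw [if_pos (show (orig[j], s[j]).2 ≠ (orig[j], s[j]).1 from by simpa using hd),
        if_pos ⟨hs, by rw [hgs, hgo]; exact hd⟩, hgs]
      rfl
  · have hjz : ¬ j < (orig.zip s).length := by rw [List.length_zip]; omega
    rw [dif_neg hjz, if_neg (fun hc => hs hc.1), PySem.Dict.getD_eq_get?_getD]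

lemma csB_getD (orig : List Char) (j : Nat) (hj : j < orig.length) (dflt : Char) :
    ∀ (cs : List String) (d : PySem.Dict Int Char),
      (cs.reverse.foldl (fun d s => csDiffs orig s.toList d) d).getD (j : Int) dflt
        = match cs.find? (csPred orig j) with
          | some s => s.toList.getD j ' '
          | none => d.getD (j : Int) dflt := by
  intro cs
  induction cs with
  | nil => intro d; rfl
  | cons s rest ih =>
    intro d
    rw [List.reverse_cons, List.foldl_append, List.foldl_cons, List.foldl_nil,
      csDiffs_getD orig s.toList _ j hj dflt, ih d]
    by_cases hp : s.toList.length > j ∧ s.toList.getD j ' ' ≠ orig.getD j ' '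
    · rw [if_pos ⟨hp.1, hp.2⟩, List.find?_cons_of_pos (by simpa [csPred] using hp)]
    · rw [if_neg (fun hc => hp ⟨hc.1, hc.2⟩),
        List.find?_cons_of_neg (by simpa [csPred] using hp)]

-- ===== VERDICT (by name: the statement is the Claim_ definition above) =====
theorem correct_sentence_spec : Claim_equal_correct_sentence := by
  intro e cs _
  unfold Spec_correct_sentence correct_sentence correct_sentence_alt
  obtain ⟨haLen, haGet⟩ := csA_inv e.toList cs e.toList.length (le_refl _)
  congr 1
  apply List.ext_getElem
  · rw [haLen, List.length_map, PySem.List.length_enumerate]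
  · intro j h1 h2
    have hj : j < e.toList.length := by rwa [haLen] at h1
    rw [← List.getD_eq_getElem _ ' ' h1, haGet j, if_pos hj,
      List.getElem_map, PySem.List.getElem_enumerate]
    have hz : ((0 : Int) + (j : Int)) = (j : Int) := zero_add _
    rw [hz, csB_getD e.toList j hj _ cs PySem.Dict.empty]
    unfold csFix
    rcases cs.find? (csPred e.toList j) with _ | t
    · rw [List.getD_eq_getElem _ ' ' hj]
      simp [PySem.Dict.getD_empty]
    · rfl
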